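-- pv_equiv track=rewrite | github.com/Angelia0hh/NPI-RGCNAE | sequence_encoder.py | get_all_kmers
-- ===== SOURCE A (Python) =====
-- from itertools import product
--
-- def get_all_kmers(k_upper_limit, isStruc=True):
--     '''
--     :param k_upper_limit:k的变化范围的上限
--     :param isStruc:是否为二级结构
--     :return:所有用数字表示的kmer字典
--     '''
--     kmers_map = {}
--     if isStruc:
--         base = '01'
--     else:
--         base = '0123'
--     for k in range(k_upper_limit):
--         kmers_map[k + 1] = []
--         for i in product(base, repeat=k + 1):
--             kmers_map[k + 1].append(''.join(i))
--     return kmers_map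
-- ===== SOURCE B (Python) =====
-- def get_all_kmers(k_upper_limit, isStruc=True):
--     base = '01' if isStruc else '0123'
--     kmers_map = {}
--     prev = ['']
--     for k in range(1, k_upper_limit + 1):
--         prev = [p + c for p in prev for c in base]
--         kmers_map[k] = prev
--     return kmers_map
-- ===== Notes on version B (the rewrite author's own statement) =====
-- stated objective: alternative
-- what changed: Replaces per-length itertools.product regeneration with an incremental scheme that builds each length-k list by appending one character to every string of the previous level.
import Mathlib
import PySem

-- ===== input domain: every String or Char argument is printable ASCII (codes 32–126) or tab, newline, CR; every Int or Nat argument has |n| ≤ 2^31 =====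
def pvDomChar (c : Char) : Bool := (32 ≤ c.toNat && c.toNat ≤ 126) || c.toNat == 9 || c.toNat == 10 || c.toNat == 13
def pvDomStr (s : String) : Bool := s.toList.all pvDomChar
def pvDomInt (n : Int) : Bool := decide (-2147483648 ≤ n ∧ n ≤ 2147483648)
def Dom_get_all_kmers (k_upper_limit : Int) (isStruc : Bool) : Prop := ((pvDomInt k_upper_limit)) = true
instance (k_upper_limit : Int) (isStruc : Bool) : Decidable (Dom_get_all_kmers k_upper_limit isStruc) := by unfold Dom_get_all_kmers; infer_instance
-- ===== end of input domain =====

-- B builds each length-k list by extending the previous level's strings with one character,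
-- instead of regenerating every length with itertools.product; alternative decomposition, same results.


-- ===== PORT A =====
-- itertools.product(base, repeat=n), as tuples (lists of chars) in product order
def pvProd (base : List Char) : Nat → List (List Char)
  | 0 => [[]]
  | n + 1 => base.flatMap (fun c => (pvProd base n).map (fun t => c :: t))

def get_all_kmers (k_upper_limit : Int) (isStruc : Bool) : List (Int × List String) :=
  let base : List Char := if isStruc then ['0', '1'] else ['0', '1', '2', '3']
  ((PySem.List.pyRange 0 k_upper_limit 1).foldl
    (fun d k =>
      -- kmers_map[k+1] = []; then append ''.join(i) for each i in product(base, repeat=k+1)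
      d.insert (k + 1)
        ((pvProd base (k + 1).toNat).foldl (fun acc i => acc ++ [String.ofList i]) []))
    PySem.Dict.empty).items

-- ===== PORT B =====
-- for k in range(1, limit+1): prev = [p + c for p in prev for c in base]; kmers_map[k] = prev
def pvAltLoop (base : List Char) : Nat → Int → List String → List (Int × List String)
  | 0, _, _ => []
  | n + 1, k, prev =>
    let cur := prev.flatMap (fun p => base.map (fun c => p.push c))
    (k, cur) :: pvAltLoop base n (k + 1) cur

def get_all_kmers_alt (k_upper_limit : Int) (isStruc : Bool) : List (Int × List String) :=
  let base : List Char := if isStruc then ['0', '1'] else ['0', '1', '2', '3']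
  pvAltLoop base k_upper_limit.toNat 1 [""]

-- ===== PRECONDITION & SPEC =====
def Spec_get_all_kmers (k_upper_limit : Int) (isStruc : Bool) (out : List (Int × List String)) : Prop := out = get_all_kmers_alt k_upper_limit isStruc
instance (k_upper_limit : Int) (isStruc : Bool) (out : List (Int × List String)) : Decidable (Spec_get_all_kmers k_upper_limit isStruc out) := by unfold Spec_get_all_kmers; infer_instance

-- ===== CLAIM (what is proved, stated in full; the proofs are below) =====
def Claim_equal_get_all_kmers : Prop := ∀ (k_upper_limit : Int) (isStruc : Bool), Dom_get_all_kmers k_upper_limit isStruc → Spec_get_all_kmers k_upper_limit isStruc (get_all_kmers k_upper_limit isStruc)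

-- ===== LEMMAS AND PROOFS =====

-- appending via foldl is map
theorem pv_foldl_append_map {α β : Type} (f : α → β) (l : List α) (acc : List β) :
    l.foldl (fun acc i => acc ++ [f i]) acc = acc ++ l.map f := by
  induction l generalizing acc with
  | nil => simp
  | cons x xs ih => simp [ih, List.append_assoc]

theorem pv_push_ofList (a : List Char) (c : Char) :
    (String.ofList a).push c = String.ofList (a ++ [c]) := by
  apply String.toList_injective; simp

-- extend-left and extend-right generate the same ordered list of words
theorem pvProd_snoc (base : List Char) (n : Nat) :
    pvProd base (n + 1) = (pvProd base n).flatMap (fun p => base.map (fun c => p ++ [c])) := by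
  induction n with
  | zero =>
    show base.flatMap (fun c => [[c]]) = _
    induction base <;> simp_all [pvProd]
  | succ m ih =>
    conv_lhs => rw [pvProd, ih]
    rw [pvProd]
    simp [List.flatMap_map, List.map_flatMap, List.flatMap_assoc, Function.comp_def]

-- B's loop, started after level m, lists levels m+1 … m+n of the product words
theorem pvAltLoop_eq (base : List Char) (n m : Nat) :
    pvAltLoop base n ((m : Int) + 1) ((pvProd base m).map String.ofList) =
      (List.range n).map (fun (j : Nat) => (((m : Int) + 1 + (j : Int)), (pvProd base (m + 1 + j)).map String.ofList)) := by
  induction n generalizing m with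
  | zero => simp [pvAltLoop]
  | succ n ih =>
    rw [pvAltLoop]
    have hcur : ((pvProd base m).map String.ofList).flatMap (fun p => base.map (fun c => p.push c)) =
        (pvProd base (m + 1)).map String.ofList := by
      rw [pvProd_snoc]
      simp [List.flatMap_map, List.map_flatMap, pv_push_ofList, Function.comp_def]
    have hm1 : ((m : Int) + 1) + 1 = ((m + 1 : Nat) : Int) + 1 := by push_cast; ring
    rw [hcur, hm1, ih (m + 1)]
    rw [List.range_succ_eq_map]
    simp only [List.map_cons, List.map_map]
    refine List.cons_eq_cons.mpr ⟨by simp, ?_⟩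
    apply List.map_congr_left
    intro j _
    have h2 : m + 1 + 1 + j = m + 1 + (j + 1) := by omega
    simp only [Function.comp, h2, Prod.mk.injEq]
    exact ⟨by push_cast; ring, trivial⟩

theorem get_all_kmers_eq (k_upper_limit : Int) (isStruc : Bool) :
    get_all_kmers k_upper_limit isStruc = get_all_kmers_alt k_upper_limit isStruc := by
  unfold get_all_kmers get_all_kmers_alt
  set base : List Char := if isStruc then ['0', '1'] else ['0', '1', '2', '3'] with hbase
  show ((PySem.List.pyRange 0 k_upper_limit 1).foldl _ PySem.Dict.empty).items = pvAltLoop base k_upper_limit.toNat 1 [""]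
  rw [PySem.List.pyRange_one, List.foldl_map]
  rw [PySem.Dict.items_foldl_insert_fresh
      (l := List.range (k_upper_limit - 0).toNat)
      (d := PySem.Dict.empty)
      (k := fun (j : Nat) => (0 : Int) + (j : Int) + 1)
      (v := fun (j : Nat) => (pvProd base ((0 : Int) + (j : Int) + 1).toNat).foldl (fun acc i => acc ++ [String.ofList i]) [])
      (by intro a _; exact PySem.Dict.contains_empty _)
      (by
        apply List.Nodup.map
        · intro a b h
          simp only at h
          omega
        · exact List.nodup_range)]
  have hstart : ([""] : List String) = (pvProd base 0).map String.ofList := by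
    simp [pvProd]
  have h1 : (1 : Int) = ((0 : Nat) : Int) + 1 := by norm_num
  rw [hstart, h1, pvAltLoop_eq base k_upper_limit.toNat 0]
  have hemp : (PySem.Dict.empty : PySem.Dict Int (List String)).items = [] := rfl
  rw [hemp, List.nil_append, Int.sub_zero]
  apply List.map_congr_left
  intro j hj
  simp only [Prod.mk.injEq]
  constructor
  · push_cast; ring
  · rw [pv_foldl_append_map, List.nil_append]
    congr 2
    omega

-- ===== VERDICT (by name: the statement is the Claim_ definition above) =====
theorem get_all_kmers_spec : Claim_equal_get_all_kmers := by
  intro k isStruc _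
  exact get_all_kmers_eq k isStruc
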